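-- pv_equiv track=rewrite | github.com/atvKail/solve | USE/27/КЕГЭГорбачёвВариант1.py | cluster_points
-- ===== SOURCE A (Python) =====
-- def cluster_points(points, W, H):
--     n = len(points)
--     assigned = [False] * n
--     clusters = []
--
--     for i in range(n):
--         if not assigned[i]:
--             cluster = [points[i]]
--             assigned[i] = True
--             changed = True
--             while changed:
--                 changed = False
--                 for j in range(n):
--                     if not assigned[j]:
--                         new_cluster = cluster + [points[j]]
--                         xs = [p[0] for p in new_cluster]
--                         ys = [p[1] for p in new_cluster]
--                         if (max(xs) - min(xs) <= W) and (max(ys) - min(ys) <= H):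
--                             cluster.append(points[j])
--                             assigned[j] = True
--                             changed = True
--             clusters.append(cluster)
--     return clusters
-- ===== SOURCE B (Python) =====
-- def _sweep(rest, cluster, box, W, H):
--     # one pass over the remaining points: absorb what fits, keep the rest
--     minx, maxx, miny, maxy = box
--     kept = []
--     for x, y in rest:
--         nminx, nmaxx = min(minx, x), max(maxx, x)
--         nminy, nmaxy = min(miny, y), max(maxy, y)
--         if nmaxx - nminx <= W and nmaxy - nminy <= H:
--             cluster.append((x, y))
--             minx, maxx, miny, maxy = nminx, nmaxx, nminy, nmaxy
--         else:
--             kept.append((x, y))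
--     return kept, (minx, maxx, miny, maxy)
--
--
-- def cluster_points(points, W, H):
--     clusters = []
--     rest = list(points)
--     while rest:
--         (x, y), rest = rest[0], rest[1:]
--         cluster = [(x, y)]
--         box = (x, x, y, y)
--         while True:
--             n = len(rest)
--             rest, box = _sweep(rest, cluster, box, W, H)
--             if len(rest) == n:
--                 break
--         clusters.append(cluster)
--     return clusters
-- ===== Notes on version B (the rewrite author's own statement) =====
-- stated objective: faster
-- what changed: B drops A's assigned-flag array and index loops entirely: it keeps a shrinking list of remaining points, pops its head to seed each cluster, and grows the cluster by repeatedly partitioning the remaining list into absorbed points and a kept list against an incrementally maintained bounding box, stopping when the list length stops shrinking.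
import Mathlib
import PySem

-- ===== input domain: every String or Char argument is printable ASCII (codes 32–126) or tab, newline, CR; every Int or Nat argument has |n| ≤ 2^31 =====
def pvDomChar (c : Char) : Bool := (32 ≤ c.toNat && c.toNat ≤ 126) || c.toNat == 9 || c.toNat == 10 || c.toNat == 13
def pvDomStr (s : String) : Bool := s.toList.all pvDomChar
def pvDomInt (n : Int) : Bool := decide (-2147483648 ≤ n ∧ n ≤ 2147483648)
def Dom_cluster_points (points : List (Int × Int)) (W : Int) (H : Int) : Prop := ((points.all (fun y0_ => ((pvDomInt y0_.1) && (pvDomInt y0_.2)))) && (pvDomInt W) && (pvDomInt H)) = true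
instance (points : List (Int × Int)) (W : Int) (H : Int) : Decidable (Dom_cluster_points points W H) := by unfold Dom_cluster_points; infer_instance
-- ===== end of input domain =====

-- B replaces A's assigned-flag array and index sweeps by a shrinking remaining-points list,
-- grown per cluster by partitioning passes against an incrementally maintained bounding box;
-- objective: faster.

-- ===== PORT A =====
-- Python max(l)/min(l) on a nonempty list (every call site in A has a nonempty argument).
def pvListMax (l : List Int) : Int :=
  match l with
  | [] => 0
  | h :: t => t.foldl max h

def pvListMin (l : List Int) : Int :=
  match l with
  | [] => 0
  | h :: t => t.foldl min h

-- inner `for j in range(n)` of A; state (assigned, cluster, changed)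
def pvPassA (points : List (Int × Int)) (W H : Int) :
    List Nat → List Bool → List (Int × Int) → Bool → List Bool × List (Int × Int) × Bool
  | [], asg, cl, ch => (asg, cl, ch)
  | j :: js, asg, cl, ch =>
    if asg.getD j true then
      pvPassA points W H js asg cl ch
    else
      let pj := points.getD j (0, 0)
      let nc := cl ++ [pj]
      let xs := nc.map Prod.fst
      let ys := nc.map Prod.snd
      if pvListMax xs - pvListMin xs ≤ W ∧ pvListMax ys - pvListMin ys ≤ H then
        pvPassA points W H js (asg.set j true) nc true
      else
        pvPassA points W H js asg cl ch

-- `while changed` of A; fuel n+1 always suffices (each repeated pass assigns ≥ 1 of ≤ n points)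
def pvWhileA (points : List (Int × Int)) (W H : Int) (n : Nat) :
    Nat → List Bool → List (Int × Int) → List Bool × List (Int × Int)
  | 0, asg, cl => (asg, cl)
  | fuel + 1, asg, cl =>
    match pvPassA points W H (List.range n) asg cl false with
    | (asg', cl', ch) => if ch then pvWhileA points W H n fuel asg' cl' else (asg', cl')

-- outer `for i in range(n)` of A
def pvOuterA (points : List (Int × Int)) (W H : Int) (n : Nat) :
    List Nat → List Bool → List (List (Int × Int)) → List (List (Int × Int))
  | [], _, acc => acc
  | i :: is, asg, acc =>
    if asg.getD i true then
      pvOuterA points W H n is asg acc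
    else
      let pi := points.getD i (0, 0)
      match pvWhileA points W H n (n + 1) (asg.set i true) [pi] with
      | (asg2, cl) => pvOuterA points W H n is asg2 (acc ++ [cl])

def cluster_points (points : List (Int × Int)) (W : Int) (H : Int) : List (List (Int × Int)) :=
  pvOuterA points W H points.length (List.range points.length)
    (List.replicate points.length false) []

-- ===== PORT B =====
-- helper `_sweep` of B: one pass over the remaining list, returning the kept list,
-- the extended cluster and the updated bounding box
def pvSweep (W H : Int) :
    List (Int × Int) → List (Int × Int) → List (Int × Int) → Int → Int → Int → Int →
    List (Int × Int) × List (Int × Int) × Int × Int × Int × Int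
  | [], kept, cl, mnx, mxx, mny, mxy => (kept, cl, mnx, mxx, mny, mxy)
  | (x, y) :: rest, kept, cl, mnx, mxx, mny, mxy =>
    let nmnx := min mnx x
    let nmxx := max mxx x
    let nmny := min mny y
    let nmxy := max mxy y
    if nmxx - nmnx ≤ W ∧ nmxy - nmny ≤ H then
      pvSweep W H rest kept (cl ++ [(x, y)]) nmnx nmxx nmny nmxy
    else
      pvSweep W H rest (kept ++ [(x, y)]) cl mnx mxx mny mxy

-- B's inner `while True: … if len(rest) == n: break`; fuel rest.length+1 always suffices
-- (every continuing iteration strictly shrinks the remaining list)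
def pvGrowB (W H : Int) :
    Nat → List (Int × Int) → List (Int × Int) → Int → Int → Int → Int →
    List (Int × Int) × List (Int × Int)
  | 0, rest, cl, _, _, _, _ => (rest, cl)
  | fuel + 1, rest, cl, mnx, mxx, mny, mxy =>
    match pvSweep W H rest [] cl mnx mxx mny mxy with
    | (kept, cl', m1, m2, m3, m4) =>
      if kept.length = rest.length then (kept, cl')
      else pvGrowB W H fuel kept cl' m1 m2 m3 m4

-- B's outer `while rest:` popping the head; fuel = initial length (each iteration pops ≥ 1 point)
def pvOuterB (W H : Int) :
    Nat → List (Int × Int) → List (List (Int × Int)) → List (List (Int × Int))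
  | _, [], acc => acc
  | 0, _ :: _, acc => acc
  | fuel + 1, (x, y) :: rest, acc =>
    match pvGrowB W H (rest.length + 1) rest [(x, y)] x x y y with
    | (rest', cl) => pvOuterB W H fuel rest' (acc ++ [cl])

def cluster_points_alt (points : List (Int × Int)) (W : Int) (H : Int) : List (List (Int × Int)) :=
  pvOuterB W H points.length points []

-- ===== PRECONDITION & SPEC =====
def Spec_cluster_points (points : List (Int × Int)) (W : Int) (H : Int) (out : List (List (Int × Int))) : Prop := out = cluster_points_alt points W H
instance (points : List (Int × Int)) (W : Int) (H : Int) (out : List (List (Int × Int))) : Decidable (Spec_cluster_points points W H out) := by unfold Spec_cluster_points; infer_instance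

-- ===== CLAIM (what is proved, stated in full; the proofs are below) =====
def Claim_equal_cluster_points : Prop := ∀ (points : List (Int × Int)) (W : Int) (H : Int), Dom_cluster_points points W H → Spec_cluster_points points W H (cluster_points points W H)

-- ===== LEMMAS AND PROOFS =====

-- the points of `ps` whose flag in `bs` is false, in order (A's "unassigned" points)
def pvSel : List (Int × Int) → List Bool → List (Int × Int)
  | [], _ => []
  | _ :: _, [] => []
  | p :: ps, b :: bs => if b then pvSel ps bs else p :: pvSel ps bs

-- B's four scalars are exactly the bounding box of the (nonempty) cluster
def pvInv (cl : List (Int × Int)) (mnx mxx mny mxy : Int) : Prop :=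
  cl ≠ [] ∧ mnx = pvListMin (cl.map Prod.fst) ∧ mxx = pvListMax (cl.map Prod.fst) ∧
    mny = pvListMin (cl.map Prod.snd) ∧ mxy = pvListMax (cl.map Prod.snd)

theorem pvListMax_append_singleton (l : List Int) (a : Int) (h : l ≠ []) :
    pvListMax (l ++ [a]) = max (pvListMax l) a := by
  cases l with
  | nil => simp at h
  | cons x t => simp [pvListMax, List.foldl_append]

theorem pvListMin_append_singleton (l : List Int) (a : Int) (h : l ≠ []) :
    pvListMin (l ++ [a]) = min (pvListMin l) a := by
  cases l with
  | nil => simp at h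
  | cons x t => simp [pvListMin, List.foldl_append]

theorem pvGetD_set_self (l : List Bool) (j : Nat) (h : j < l.length) :
    (l.set j true).getD j true = true := by
  simp [List.getD, h]

theorem pvGetD_set_ne (l : List Bool) (j k : Nat) (h : k ≠ j) :
    (l.set j true).getD k true = l.getD k true := by
  simp [List.getD, (Ne.symm h : j ≠ k)]

theorem pvDrop_set (l : List Bool) (j : Nat) :
    (l.set j true).drop (j + 1) = l.drop (j + 1) := by
  apply List.ext_getElem? ; intro k
  simp [List.getElem?_drop, List.getElem?_set]
  omega

theorem pvSel_length_le : ∀ (ps : List (Int × Int)) (bs : List Bool),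
    (pvSel ps bs).length ≤ ps.length := by
  intro ps
  induction ps with
  | nil => intro bs; simp [pvSel]
  | cons p ps ih =>
    intro bs
    cases bs with
    | nil => simp [pvSel]
    | cons b bs =>
      cases b with
      | false => simpa [pvSel] using ih bs
      | true => simp [pvSel]; exact Nat.le_succ_of_le (ih bs)

theorem pvSel_drop : ∀ (i : Nat) (ps : List (Int × Int)) (bs : List Bool),
    bs.length = ps.length → (∀ k, k < i → bs.getD k true = true) →
    pvSel ps bs = pvSel (ps.drop i) (bs.drop i) := by
  intro i
  induction i with
  | zero => intro ps bs _ _; rfl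
  | succ i ih =>
    intro ps bs hlen hall
    cases ps with
    | nil =>
      cases bs with
      | nil => rfl
      | cons b bs => simp at hlen
    | cons p ps =>
      cases bs with
      | nil => simp at hlen
      | cons b bs =>
        have hb : b = true := by
          have := hall 0 (Nat.succ_pos i); simpa [List.getD] using this
        subst hb
        have : pvSel ps bs = pvSel (ps.drop i) (bs.drop i) := by
          apply ih ps bs (by simpa using hlen)
          intro k hk
          have := hall (k + 1) (by omega)
          simpa [List.getD] using this
        simpa [pvSel] using this

theorem pvSel_replicate_false : ∀ (ps : List (Int × Int)),
    pvSel ps (List.replicate ps.length false) = ps := by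
  intro ps
  induction ps with
  | nil => rfl
  | cons p ps ih => simpa [pvSel, List.replicate_succ] using ih

-- one inner pass: A's scan of indices [j, n) over the flag array equals B's sweep of the
-- selected remaining points, with the incremental box tracking the cluster's bounding box
theorem pvPass_eq (points : List (Int × Int)) (W H : Int) :
    ∀ (ps : List (Int × Int)) (j : Nat), points.drop j = ps →
    ∀ (asg : List Bool), asg.length = points.length →
    ∀ (kept cl : List (Int × Int)) (mnx mxx mny mxy : Int) (ch : Bool),
      pvInv cl mnx mxx mny mxy →
    ∃ asg' cl' m1 m2 m3 m4 ch',
      pvPassA points W H (List.range' j ps.length) asg cl ch = (asg', cl', ch') ∧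
      pvSweep W H (pvSel ps (asg.drop j)) kept cl mnx mxx mny mxy
        = (kept ++ pvSel ps (asg'.drop j), cl', m1, m2, m3, m4) ∧
      pvInv cl' m1 m2 m3 m4 ∧
      asg'.length = asg.length ∧
      (∀ k, k < j → asg'.getD k true = asg.getD k true) ∧
      (∀ k, asg.getD k true = true → asg'.getD k true = true) ∧
      (pvSel ps (asg'.drop j)).length ≤ (pvSel ps (asg.drop j)).length ∧
      ch' = (ch || !((pvSel ps (asg'.drop j)).length == (pvSel ps (asg.drop j)).length)) := by
  intro ps
  induction ps with
  | nil =>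
    intro j _ asg hlen kept cl mnx mxx mny mxy ch hinv
    refine ⟨asg, cl, mnx, mxx, mny, mxy, ch, rfl, ?_, hinv, rfl, fun _ _ => rfl, fun _ h => h, le_refl _, ?_⟩
    · simp [pvSel]
      cases asg.drop j <;> rfl
    · simp
  | cons p ps' ih =>
    intro j hdrop asg hlen kept cl mnx mxx mny mxy ch hinv
    obtain ⟨x, y⟩ := p
    have hj : j < points.length := by
      by_contra h
      have : points.drop j = [] := List.drop_eq_nil_of_le (by omega)
      rw [hdrop] at this; simp at this
    have hja : j < asg.length := by omega
    have hget : points.getD j (0, 0) = (x, y) := by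
      have h0 : points[j]? = some (x, y) := by
        have h1 : (points.drop j)[0]? = some (x, y) := by rw [hdrop]; rfl
        simpa [List.getElem?_drop] using h1
      simp [List.getD, h0]
    have hdrop' : points.drop (j + 1) = ps' := by
      have h1 : (points.drop j).drop 1 = ps' := by rw [hdrop]; rfl
      simpa [List.drop_drop] using h1
    have hrange : List.range' j (ps'.length + 1) = j :: List.range' (j + 1) ps'.length := by
      simp [List.range'_succ]
    have hdropA : asg.drop j = asg.getD j true :: asg.drop (j + 1) := by
      rw [List.drop_eq_getElem_cons hja, List.getD_eq_getElem asg true hja]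
    obtain ⟨hne, e1, e2, e3, e4⟩ := hinv
    rw [List.length_cons, hrange]
    by_cases hb : asg.getD j true = true
    · -- A skips index j; its point is not in B's remaining list
      obtain ⟨asg', cl', m1, m2, m3, m4, ch', hA, hB, hI, hL, hlow, hmono, hle, hch⟩ :=
        ih (j + 1) hdrop' asg hlen kept cl mnx mxx mny mxy ch ⟨hne, e1, e2, e3, e4⟩
      have hb' : asg'.getD j true = true := hmono j hb
      have hdropA' : asg'.drop j = asg'.getD j true :: asg'.drop (j + 1) := by
        rw [List.drop_eq_getElem_cons (by omega), List.getD_eq_getElem asg' true (by omega)]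
      have hselA : pvSel ((x, y) :: ps') (asg.drop j) = pvSel ps' (asg.drop (j + 1)) := by
        rw [hdropA, hb]; simp [pvSel]
      have hselA' : pvSel ((x, y) :: ps') (asg'.drop j) = pvSel ps' (asg'.drop (j + 1)) := by
        rw [hdropA', hb']; simp [pvSel]
      refine ⟨asg', cl', m1, m2, m3, m4, ch', ?_, ?_, hI, hL, fun k hk => hlow k (by omega), hmono, ?_, ?_⟩
      · rw [pvPassA]; rw [if_pos hb]; exact hA
      · rw [hselA, hselA']; exact hB
      · rw [hselA, hselA']; exact hle
      · rw [hselA, hselA']; exact hch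
    · have hbf : asg.getD j true = false := by
        cases h : asg.getD j true with
        | false => rfl
        | true => exact absurd h hb
      have hmapf : cl.map Prod.fst ≠ [] := by simpa using hne
      have hmaps : cl.map Prod.snd ≠ [] := by simpa using hne
      have hx1 : pvListMax ((cl ++ [(x, y)]).map Prod.fst) = max mxx x := by
        rw [List.map_append]
        simpa [e2] using pvListMax_append_singleton (cl.map Prod.fst) x hmapf
      have hx2 : pvListMin ((cl ++ [(x, y)]).map Prod.fst) = min mnx x := by
        rw [List.map_append]
        simpa [e1] using pvListMin_append_singleton (cl.map Prod.fst) x hmapf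
      have hy1 : pvListMax ((cl ++ [(x, y)]).map Prod.snd) = max mxy y := by
        rw [List.map_append]
        simpa [e4] using pvListMax_append_singleton (cl.map Prod.snd) y hmaps
      have hy2 : pvListMin ((cl ++ [(x, y)]).map Prod.snd) = min mny y := by
        rw [List.map_append]
        simpa [e3] using pvListMin_append_singleton (cl.map Prod.snd) y hmaps
      have hselA : pvSel ((x, y) :: ps') (asg.drop j) = (x, y) :: pvSel ps' (asg.drop (j + 1)) := by
        rw [hdropA, hbf]; simp [pvSel]
      by_cases hcond : max mxx x - min mnx x ≤ W ∧ max mxy y - min mny y ≤ H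
      · -- the point fits: A and B both absorb it
        obtain ⟨asg', cl', m1, m2, m3, m4, ch', hA, hB, hI, hL, hlow, hmono, hle, hch⟩ :=
          ih (j + 1) hdrop' (asg.set j true) (by simpa using hlen) kept (cl ++ [(x, y)])
            (min mnx x) (max mxx x) (min mny y) (max mxy y) true
            ⟨by simp, hx2.symm, hx1.symm, hy2.symm, hy1.symm⟩
        have hsetdrop : (asg.set j true).drop (j + 1) = asg.drop (j + 1) := pvDrop_set asg j
        have hLa : asg'.length = asg.length := by simpa using hL
        have hb' : asg'.getD j true = true :=
          hmono j (by rw [pvGetD_set_self asg j hja])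
        have hdropA' : asg'.drop j = asg'.getD j true :: asg'.drop (j + 1) := by
          rw [List.drop_eq_getElem_cons (by omega), List.getD_eq_getElem asg' true (by omega)]
        have hselA' : pvSel ((x, y) :: ps') (asg'.drop j) = pvSel ps' (asg'.drop (j + 1)) := by
          rw [hdropA', hb']; simp [pvSel]
        refine ⟨asg', cl', m1, m2, m3, m4, ch', ?_, ?_, hI, by simpa using hL, ?_, ?_, ?_, ?_⟩
        · rw [pvPassA]; rw [if_neg hb]
          simp only [hget]
          rw [if_pos (by rw [hx1, hx2, hy1, hy2]; exact hcond)]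
          exact hA
        · rw [hselA, hselA']
          rw [pvSweep]
          rw [if_pos hcond]
          rw [hsetdrop] at hB
          exact hB
        · intro k hk
          have h1 := hlow k (Nat.lt_succ_of_lt hk)
          rw [h1, pvGetD_set_ne asg j k (Nat.ne_of_lt hk)]
        · intro k hk
          refine hmono k ?_
          rcases eq_or_ne k j with h | h
          · rw [h]; exact pvGetD_set_self asg j hja
          · rw [pvGetD_set_ne asg j k h]; exact hk
        · rw [hselA, hselA']
          rw [hsetdrop] at hle
          simp only [List.length_cons]
          omega
        · rw [hselA, hselA']
          have hlt : (pvSel ps' (asg'.drop (j + 1))).length <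
              ((x, y) :: pvSel ps' (asg.drop (j + 1))).length := by
            rw [hsetdrop] at hle
            simp only [List.length_cons]; omega
          have : ((pvSel ps' (asg'.drop (j + 1))).length ==
              ((x, y) :: pvSel ps' (asg.drop (j + 1))).length) = false := by
            apply beq_false_of_ne
            simp only [List.length_cons] at hlt ⊢
            omega
          rw [this]
          rw [hch]
          simp
      · -- the point does not fit: A leaves it, B pushes it onto kept
        obtain ⟨asg', cl', m1, m2, m3, m4, ch', hA, hB, hI, hL, hlow, hmono, hle, hch⟩ :=
          ih (j + 1) hdrop' asg hlen (kept ++ [(x, y)]) cl mnx mxx mny mxy ch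
            ⟨hne, e1, e2, e3, e4⟩
        have hb' : asg'.getD j true = asg.getD j true := hlow j (by omega)
        have hdropA' : asg'.drop j = asg'.getD j true :: asg'.drop (j + 1) := by
          rw [List.drop_eq_getElem_cons (by omega), List.getD_eq_getElem asg' true (by omega)]
        have hselA' : pvSel ((x, y) :: ps') (asg'.drop j)
            = (x, y) :: pvSel ps' (asg'.drop (j + 1)) := by
          rw [hdropA', hb', hbf]; simp [pvSel]
        refine ⟨asg', cl', m1, m2, m3, m4, ch', ?_, ?_, hI, hL, fun k hk => hlow k (by omega), hmono, ?_, ?_⟩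
        · rw [pvPassA]; rw [if_neg hb]
          simp only [hget]
          rw [if_neg (by rw [hx1, hx2, hy1, hy2]; exact hcond)]
          exact hA
        · rw [hselA, hselA']
          rw [pvSweep]
          rw [if_neg hcond]
          rw [hB]
          simp
        · rw [hselA, hselA']; simpa using hle
        · rw [hselA, hselA', hch]
          simp

-- the grow loops: A's `while changed` equals B's `while True … break`, provided both have
-- enough fuel (one more than the number of remaining points)
theorem pvGrow_eq (points : List (Int × Int)) (W H : Int) :
    ∀ (L : Nat), ∀ (fuelA fuelB : Nat) (asg : List Bool) (cl : List (Int × Int))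
      (mnx mxx mny mxy : Int),
    asg.length = points.length → (pvSel points asg).length = L →
    L + 1 ≤ fuelA → L + 1 ≤ fuelB → pvInv cl mnx mxx mny mxy →
    ∃ asg' cl',
      pvWhileA points W H points.length fuelA asg cl = (asg', cl') ∧
      pvGrowB W H fuelB (pvSel points asg) cl mnx mxx mny mxy = (pvSel points asg', cl') ∧
      asg'.length = asg.length ∧
      (∀ k, asg.getD k true = true → asg'.getD k true = true) ∧
      (pvSel points asg').length ≤ (pvSel points asg).length := by
  intro L
  induction L using Nat.strong_induction_on with
  | _ L IH =>
    intro fuelA fuelB asg cl mnx mxx mny mxy hlen hL hfa hfb hinv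
    match fuelA, hfa with
    | fA + 1, _ =>
    match fuelB, hfb with
    | fB + 1, _ =>
    obtain ⟨asg1, cl1, m1, m2, m3, m4, ch1, hA, hB, hI, hL1, _, hmono, hle, hch⟩ :=
      pvPass_eq points W H points 0 rfl asg hlen [] cl mnx mxx mny mxy false hinv
    simp only [List.drop_zero] at hA hB hle hch
    have hA' : pvPassA points W H (List.range points.length) asg cl false = (asg1, cl1, ch1) := by
      rw [List.range_eq_range']; exact hA
    have hB' : pvSweep W H (pvSel points asg) [] cl mnx mxx mny mxy
        = (pvSel points asg1, cl1, m1, m2, m3, m4) := by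
      simpa using hB
    rw [pvWhileA, hA', pvGrowB, hB']
    by_cases heq : (pvSel points asg1).length = (pvSel points asg).length
    · have hch1 : ch1 = false := by
        rw [hch]
        simp [heq]
      refine ⟨asg1, cl1, ?_, ?_, hL1, hmono, hle⟩
      · dsimp only
        rw [hch1]
        simp
      · dsimp only
        rw [if_pos heq]
    · have hch1 : ch1 = true := by
        rw [hch]
        simp [heq]
      have hlt : (pvSel points asg1).length < L := by omega
      obtain ⟨asg', cl', hWA, hGB, hL', hmono', hle'⟩ :=
        IH (pvSel points asg1).length hlt fA fB asg1 cl1 m1 m2 m3 m4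
          (by omega) rfl (by omega) (by omega) hI
      refine ⟨asg', cl', ?_, ?_, by omega,
        fun k hk => hmono' k (hmono k hk), le_trans hle' hle⟩
      · dsimp only
        rw [hch1]
        simpa using hWA
      · dsimp only
        rw [if_neg heq]
        exact hGB

-- the outer loops: A's indexed scan with the flag array equals B's head-popping recursion
-- over the selected remaining list
theorem pvOuter_eq (points : List (Int × Int)) (W H : Int) :
    ∀ (ps : List (Int × Int)) (i : Nat), points.drop i = ps →
    ∀ (asg : List Bool) (acc : List (List (Int × Int))) (fuelB : Nat),
    asg.length = points.length → (∀ k, k < i → asg.getD k true = true) →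
    (pvSel points asg).length ≤ fuelB →
    pvOuterB W H fuelB (pvSel points asg) acc
      = pvOuterA points W H points.length (List.range' i ps.length) asg acc := by
  intro ps
  induction ps with
  | nil =>
    intro i hdrop asg acc fuelB hlen hall _
    have hsel : pvSel points asg = [] := by
      rw [pvSel_drop i points asg (by omega) hall, hdrop]
      cases asg.drop i <;> rfl
    rw [hsel]
    cases fuelB <;> rfl
  | cons p ps' ih =>
    intro i hdrop asg acc fuelB hlen hall hfuel
    obtain ⟨x, y⟩ := p
    have hi : i < points.length := by
      by_contra h
      have : points.drop i = [] := List.drop_eq_nil_of_le (by omega)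
      rw [hdrop] at this; simp at this
    have hia : i < asg.length := by omega
    have hget : points.getD i (0, 0) = (x, y) := by
      have h0 : points[i]? = some (x, y) := by
        have h1 : (points.drop i)[0]? = some (x, y) := by rw [hdrop]; rfl
        simpa [List.getElem?_drop] using h1
      simp [List.getD, h0]
    have hdrop' : points.drop (i + 1) = ps' := by
      have h1 : (points.drop i).drop 1 = ps' := by rw [hdrop]; rfl
      simpa [List.drop_drop] using h1
    have hdropA : asg.drop i = asg.getD i true :: asg.drop (i + 1) := by
      rw [List.drop_eq_getElem_cons hia, List.getD_eq_getElem asg true hia]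
    have hrange : List.range' i (ps'.length + 1) = i :: List.range' (i + 1) ps'.length := by
      simp [List.range'_succ]
    have hselfull : pvSel points asg = pvSel ((x, y) :: ps') (asg.drop i) := by
      rw [pvSel_drop i points asg (by omega) hall, hdrop]
    rw [List.length_cons, hrange]
    by_cases hb : asg.getD i true = true
    · have hall' : ∀ k, k < i + 1 → asg.getD k true = true := by
        intro k hk
        rcases eq_or_ne k i with h | h
        · rw [h]; exact hb
        · exact hall k (by omega)
      rw [pvOuterA]; rw [if_pos hb]
      exact ih (i + 1) hdrop' asg acc fuelB hlen hall' hfuel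
    · have hbf : asg.getD i true = false := by
        cases h : asg.getD i true with
        | false => rfl
        | true => exact absurd h hb
      have hsetall : ∀ k, k < i + 1 → (asg.set i true).getD k true = true := by
        intro k hk
        rcases eq_or_ne k i with h | h
        · rw [h]; exact pvGetD_set_self asg i hia
        · rw [pvGetD_set_ne asg i k h]; exact hall k (by omega)
      have hsetdrop : (asg.set i true).drop (i + 1) = asg.drop (i + 1) := pvDrop_set asg i
      have hrest0 : pvSel points (asg.set i true) = pvSel ps' (asg.drop (i + 1)) := by
        rw [pvSel_drop (i + 1) points (asg.set i true) (by simpa using hlen) hsetall,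
          hdrop', hsetdrop]
      have hsel : pvSel points asg = (x, y) :: pvSel ps' (asg.drop (i + 1)) := by
        rw [hselfull, hdropA, hbf]; simp [pvSel]
      have hL0 : (pvSel ps' (asg.drop (i + 1))).length ≤ points.length := by
        calc (pvSel ps' (asg.drop (i + 1))).length ≤ ps'.length := pvSel_length_le _ _
        _ ≤ points.length := by
            have := congrArg List.length hdrop'
            simp at this
            omega
      obtain ⟨asg2, cl, hWA, hGB, hL2, hmono2, hle2⟩ :=
        pvGrow_eq points W H (pvSel ps' (asg.drop (i + 1))).length
          (points.length + 1) ((pvSel ps' (asg.drop (i + 1))).length + 1)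
          (asg.set i true) [(x, y)] x x y y
          (by simpa using hlen) (by rw [hrest0]) (by omega) (by omega)
          ⟨by simp, rfl, rfl, rfl, rfl⟩
      rw [hrest0] at hGB
      have hle2' := hle2
      rw [hrest0] at hle2'
      have hL2' : asg2.length = points.length := by
        rw [hL2, List.length_set]; exact hlen
      have hall2 : ∀ k, k < i + 1 → asg2.getD k true = true :=
        fun k hk => hmono2 k (hsetall k hk)
      rw [hsel] at hfuel
      simp only [List.length_cons] at hfuel
      match fuelB, hfuel with
      | fB + 1, hfB1 =>
      have hfB : (pvSel points asg2).length ≤ fB := by omega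
      rw [hsel]
      rw [pvOuterB, hGB]
      dsimp only
      rw [pvOuterA]; rw [if_neg hb]
      simp only [hget, hWA]
      exact ih (i + 1) hdrop' asg2 (acc ++ [cl]) fB hL2' hall2 hfB

-- ===== VERDICT (by name: the statement is the Claim_ definition above) =====
theorem cluster_points_spec : Claim_equal_cluster_points := by
  intro points W H _
  unfold Spec_cluster_points cluster_points cluster_points_alt
  have h := pvOuter_eq points W H points 0 rfl (List.replicate points.length false) []
    points.length (by simp) (fun k hk => absurd hk (Nat.not_lt_zero k))
    (by rw [pvSel_replicate_false])
  rw [pvSel_replicate_false] at h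
  rw [List.range_eq_range']
  exact h.symm
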